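-- pv_equiv track=rewrite | github.com/francis-clairicia/EasyNetwork | src/easynetwork/lowlevel/std_asyncio/_asyncio_utils.py | _interleave_addrinfos
-- ===== SOURCE A (Python) =====
-- import itertools
-- from collections import OrderedDict
-- from collections.abc import Iterable, Sequence
-- from typing import Any, cast
--
-- def _interleave_addrinfos(
--     addrinfos: Sequence[tuple[int, int, int, str, tuple[Any, ...]]]
-- ) -> list[tuple[int, int, int, str, tuple[Any, ...]]]:
--     """Interleave list of addrinfo tuples by family."""
--     # Group addresses by family
--     addrinfos_by_family: OrderedDict[int, list[tuple[Any, ...]]] = OrderedDict()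
--     for addr in addrinfos:
--         family = addr[0]
--         if family not in addrinfos_by_family:
--             addrinfos_by_family[family] = []
--         addrinfos_by_family[family].append(addr)
--     addrinfos_lists = list(addrinfos_by_family.values())
--     return [addr for addr in itertools.chain.from_iterable(itertools.zip_longest(*addrinfos_lists)) if addr is not None]
-- ===== SOURCE B (Python) =====
-- def _interleave_addrinfos(addrinfos):
--     """Decorate-sort-undecorate: tag each entry with its occurrence number within
--     its family and its family's first-seen rank, then one stable sort on a single
--     integer key recovers the interleaved order -- no per-family lists are built."""
--     fam = {}  # family -> (first-seen rank, occurrences so far)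
--     tagged = []
--     for addr in addrinfos:
--         rank, occ = fam.get(addr[0], (len(fam), 0))
--         fam[addr[0]] = (rank, occ + 1)
--         tagged.append((occ, rank, addr))
--     nfam = len(fam)
--     tagged.sort(key=lambda t: t[0] * nfam + t[1])
--     return [t[2] for t in tagged]
-- ===== Notes on version B (the rewrite author's own statement) =====
-- stated objective: alternative
-- what changed: B never builds per-family lists or interleaves them: it decorates each entry in one pass with (occurrence-within-family, family-first-seen-rank), then a single sort on the combined integer key occ*nfamilies+rank recovers the interleaved order (decorate-sort-undecorate instead of group-then-zip_longest).
import Mathlib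
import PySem

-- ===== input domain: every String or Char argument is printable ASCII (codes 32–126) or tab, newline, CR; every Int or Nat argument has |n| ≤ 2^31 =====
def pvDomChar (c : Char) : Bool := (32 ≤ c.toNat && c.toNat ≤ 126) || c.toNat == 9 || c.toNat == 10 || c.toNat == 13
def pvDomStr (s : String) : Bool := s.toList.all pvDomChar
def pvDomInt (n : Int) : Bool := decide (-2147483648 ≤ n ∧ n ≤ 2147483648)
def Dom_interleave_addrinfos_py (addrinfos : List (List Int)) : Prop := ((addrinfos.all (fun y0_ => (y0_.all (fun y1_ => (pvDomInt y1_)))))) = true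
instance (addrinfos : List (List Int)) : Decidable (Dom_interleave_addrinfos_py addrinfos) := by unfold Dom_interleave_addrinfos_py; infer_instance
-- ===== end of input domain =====

-- B replaces the group-then-zip_longest-interleave of A by decorate-sort-undecorate:
-- each entry is tagged with (occurrence-within-family, family-first-seen-rank) in one pass
-- and a single sort on that key recovers the interleaved order; objective: alternative.

-- ===== PORT A =====
-- itertools.zip_longest(*lists) with fillvalue None, ported as the list of columns
-- (column i holds l[i] if i < len(l) else none); exact for lists of equal or unequal lengths.
def pyZipLongest (ls : List (List (List Int))) : List (List (Option (List Int))) :=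
  let m := ls.foldl (fun acc l => max acc l.length) 0
  (List.range m).map (fun i => ls.map (fun l => l[i]?))

def interleave_addrinfos_py (addrinfos : List (List Int)) : List (List Int) :=
  let d : PySem.Dict Int (List (List Int)) := addrinfos.foldl (fun d addr =>
      match PySem.List.pyGet? addr 0 with
      | none => d  -- addr[0] raises IndexError in Python; excluded by Pre_
      | some family =>
        let d := if d.contains family then d else d.insert family []
        d.modify family [] (fun l => l ++ [addr])) PySem.Dict.empty
  let addrinfos_lists := d.values
  ((pyZipLongest addrinfos_lists).flatten).filterMap id

-- ===== PORT B =====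
def interleave_addrinfos_py_alt (addrinfos : List (List Int)) : List (List Int) :=
  let st : PySem.Dict Int (Int × Int) × List (Int × Int × List Int) :=
    addrinfos.foldl (fun st addr =>
      match PySem.List.pyGet? addr 0 with
      | none => st  -- addr[0] raises IndexError in Python; excluded by Pre_
      | some f =>
        let ro := (st.1.get? f).getD (((st.1.size : Int), 0))
        (st.1.insert f (ro.1, ro.2 + 1), st.2 ++ [(ro.2, ro.1, addr)])) (PySem.Dict.empty, [])
  let nfam : Int := (st.1.size : Int)
  (PySem.List.sorted st.2 (fun t => t.1 * nfam + t.2.1)).map (fun t => t.2.2)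

-- ===== PRECONDITION & SPEC =====
-- Pre_ excludes exactly the inputs containing an empty tuple, on which A's addr[0] raises IndexError.
def Pre_interleave_addrinfos_py (addrinfos : List (List Int)) : Prop :=
  ∀ l ∈ addrinfos, l ≠ []
instance (addrinfos : List (List Int)) : Decidable (Pre_interleave_addrinfos_py addrinfos) := by
  unfold Pre_interleave_addrinfos_py; infer_instance
def pvWitness_interleave_addrinfos_py : List (List Int) :=
  [[2, 1, 0, 7], [10, 5, 0, 8], [2, 3, 0, 9], [10, 6, 0, 1]]

def Spec_interleave_addrinfos_py (addrinfos : List (List Int)) (out : List (List Int)) : Prop := out = interleave_addrinfos_py_alt addrinfos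
instance (addrinfos : List (List Int)) (out : List (List Int)) : Decidable (Spec_interleave_addrinfos_py addrinfos out) := by unfold Spec_interleave_addrinfos_py; infer_instance

-- ===== CLAIM (what is proved, stated in full; the proofs are below) =====
def Claim_equal_interleave_addrinfos_py : Prop := ∀ (addrinfos : List (List Int)), Dom_interleave_addrinfos_py addrinfos → Pre_interleave_addrinfos_py addrinfos → Spec_interleave_addrinfos_py addrinfos (interleave_addrinfos_py addrinfos)

-- ===== LEMMAS AND PROOFS =====

def decorFrom (r : Int) : List (List (List Int)) → List (Int × Int × List Int)
  | [] => []
  | g :: t => (PySem.List.enumerate g 0).map (fun ix => (ix.1, r, ix.2)) ++ decorFrom (r + 1) t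
def colRow (k : Nat) (r : Int) : List (List (List Int)) → List (Int × Int × List Int)
  | [] => []
  | g :: t => (match g[k]? with | some x => [((k : Int), r, x)] | none => []) ++ colRow k (r + 1) t

lemma mem_decorFrom (ls : List (List (List Int))) (r : Int) (e : Int × Int × List Int) :
    e ∈ decorFrom r ls ↔ ∃ (i : Nat) (hi : i < ls.length) (k : Nat) (hk : k < ls[i].length),
      e = ((k : Int), r + i, ls[i][k]) := by
  induction ls generalizing r with
  | nil => simp [decorFrom]
  | cons g t ih =>
    simp only [decorFrom, List.mem_append, List.mem_map, PySem.List.mem_enumerate_iff, ih]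
    constructor
    · rintro (⟨p, ⟨k, hk, rfl⟩, rfl⟩ | ⟨i, hi, k, hk, rfl⟩)
      · exact ⟨0, by simp, k, by simpa using hk, by simp⟩
      · exact ⟨i + 1, by simpa using hi, k, by simpa using hk, by simp; ring_nf⟩
    · rintro ⟨i, hi, k, hk, rfl⟩
      cases i with
      | zero => exact Or.inl ⟨(k, g[k]), ⟨k, by simpa using hk, by simp⟩, by simp; rfl⟩
      | succ i => exact Or.inr ⟨i, by simpa using hi, k, by simpa using hk, by simp; ring_nf; exact ⟨trivial, rfl⟩⟩

lemma mem_colRow (ls : List (List (List Int))) (k : Nat) (r : Int) (e : Int × Int × List Int) :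
    e ∈ colRow k r ls ↔ ∃ (i : Nat) (hi : i < ls.length) (hk : k < ls[i].length),
      e = ((k : Int), r + i, ls[i][k]) := by
  induction ls generalizing r with
  | nil => simp [colRow]
  | cons g t ih =>
    simp only [colRow, List.mem_append, ih]
    constructor
    · rintro (hmem | ⟨i, hi, hk, rfl⟩)
      · cases hg : g[k]? with
        | none => simp [hg] at hmem
        | some x =>
          simp [hg] at hmem
          have hk : k < g.length := List.getElem?_eq_some_iff.mp hg |>.1
          exact ⟨0, by simp, by simpa using hk, by subst hmem; simp [(List.getElem?_eq_some_iff.mp hg).2]⟩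
      · exact ⟨i + 1, by simpa using hi, by simpa using hk, by simp; ring_nf⟩
    · rintro ⟨i, hi, hk, rfl⟩
      cases i with
      | zero =>
        left
        have : g[k]? = some g[k] := List.getElem?_eq_some_iff.mpr ⟨by simpa using hk, rfl⟩
        simp [this]; rfl
      | succ i => exact Or.inr ⟨i, by simpa using hi, by simpa using hk, by simp; ring_nf; exact ⟨trivial, rfl⟩⟩

def colDecor (m : Nat) (ls : List (List (List Int))) : List (Int × Int × List Int) :=
  (List.range m).flatMap (fun k => colRow k 0 ls)

lemma pairwise_rank_decorFrom (ls : List (List (List Int))) (r : Int) :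
    (decorFrom r ls).Pairwise (fun a b => a.2.1 < b.2.1 ∨ (a.2.1 = b.2.1 ∧ a.1 < b.1)) := by
  induction ls generalizing r with
  | nil => simp [decorFrom]
  | cons g t ih =>
    rw [decorFrom, List.pairwise_append]
    refine ⟨?_, ih (r + 1), ?_⟩
    · rw [List.pairwise_map]
      exact (PySem.List.pairwise_lt_enumerate g 0).imp (fun h => Or.inr ⟨rfl, h⟩)
    · rintro a ha b hb
      obtain ⟨p, -, rfl⟩ := List.mem_map.mp ha
      obtain ⟨i, hi, k, hk, rfl⟩ := (mem_decorFrom t (r+1) b).mp hb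
      left; simp; omega

lemma key_mono_nat (k k' i i' F : Nat) (hk : k < k') (hi : i < F) :
    k * F + i < k' * F + i' := by
  calc k * F + i < k * F + F := by omega
    _ = (k + 1) * F := by ring
    _ ≤ k' * F := Nat.mul_le_mul_right F hk
    _ ≤ k' * F + i' := Nat.le_add_right _ _

lemma pairwise_rank_colRow (ls : List (List (List Int))) (k : Nat) (r : Int) :
    (colRow k r ls).Pairwise (fun a b => a.2.1 < b.2.1) := by
  induction ls generalizing r with
  | nil => simp [colRow]
  | cons g t ih =>
    rw [colRow, List.pairwise_append]
    refine ⟨?_, ih (r + 1), ?_⟩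
    · cases hg : g[k]? <;> simp
    · rintro a ha b hb
      obtain ⟨i, hi, hk2, rfl⟩ := (mem_colRow t k (r+1) b).mp hb
      cases hg : g[k]? with
      | none => simp [hg] at ha
      | some x => simp [hg] at ha; subst ha; simp; omega

lemma pairwise_key_colDecor (ls : List (List (List Int))) (m : Nat) :
    (colDecor m ls).Pairwise (fun a b =>
      a.1 * (ls.length : Int) + a.2.1 < b.1 * (ls.length : Int) + b.2.1) := by
  unfold colDecor
  rw [List.pairwise_flatMap]
  constructor
  · intro k _
    refine (pairwise_rank_colRow ls k 0).imp_of_mem ?_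
    intro a b ha hb hlt
    obtain ⟨i, hi, hki, rfl⟩ := (mem_colRow ls k 0 a).mp ha
    obtain ⟨j, hj, hkj, rfl⟩ := (mem_colRow ls k 0 b).mp hb
    simp only at hlt ⊢
    omega
  · refine List.pairwise_lt_range.imp_of_mem ?_
    intro k k' _ _ hkk' a ha b hb
    obtain ⟨i, hi, hki, rfl⟩ := (mem_colRow ls k 0 a).mp ha
    obtain ⟨j, hj, hkj, rfl⟩ := (mem_colRow ls k' 0 b).mp hb
    simp only [zero_add]
    have h := key_mono_nat k k' i j ls.length hkk' hi
    exact_mod_cast h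

lemma pyGet?_zero_cons (x : Int) (t : List Int) : PySem.List.pyGet? (x :: t) 0 = some x := by
  simp [PySem.List.pyGet?, PySem.List.pyIdx?]

def stepA (d : PySem.Dict Int (List (List Int))) (addr : List Int) : PySem.Dict Int (List (List Int)) :=
  match PySem.List.pyGet? addr 0 with
  | none => d
  | some family =>
    let d := if d.contains family then d else d.insert family []
    d.modify family [] (fun l => l ++ [addr])

def stepB (st : PySem.Dict Int (Int × Int) × List (Int × Int × List Int)) (addr : List Int) :
    PySem.Dict Int (Int × Int) × List (Int × Int × List Int) :=
  match PySem.List.pyGet? addr 0 with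
  | none => st
  | some f =>
    let ro := (st.1.get? f).getD (((st.1.size : Int), 0))
    (st.1.insert f (ro.1, ro.2 + 1), st.2 ++ [(ro.2, ro.1, addr)])

def enrichFrom (r : Int) : List (Int × List (List Int)) → List (Int × Int × Int)
  | [] => []
  | (k, g) :: t => (k, r, (g.length : Int)) :: enrichFrom (r + 1) t

lemma map_fst_enrichFrom (itms : List (Int × List (List Int))) (r : Int) :
    (enrichFrom r itms).map (·.1) = itms.map (·.1) := by
  induction itms generalizing r with
  | nil => rfl
  | cons p t ih => cases p; simp [enrichFrom, ih]

lemma length_enrichFrom (itms : List (Int × List (List Int))) (r : Int) :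
    (enrichFrom r itms).length = itms.length := by
  induction itms generalizing r with
  | nil => rfl
  | cons p t ih => cases p; simp [enrichFrom, ih]

lemma enrichFrom_append (xs ys : List (Int × List (List Int))) (r : Int) :
    enrichFrom r (xs ++ ys) = enrichFrom r xs ++ enrichFrom (r + xs.length) ys := by
  induction xs generalizing r with
  | nil => simp [enrichFrom]
  | cons p t ih => cases p; simp [enrichFrom, ih]; ring_nf

lemma decorFrom_append (xs ys : List (List (List Int))) (r : Int) :
    decorFrom r (xs ++ ys) = decorFrom r xs ++ decorFrom (r + xs.length) ys := by
  induction xs generalizing r with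
  | nil => simp [decorFrom]
  | cons g t ih => simp [decorFrom, ih]; ring_nf

lemma map_if_not_key {α β : Type} [BEq α] (L : List (α × β)) (x : α) (v : α × β)
    (hL : ∀ q ∈ L, ¬(q.1 == x) = true) :
    L.map (fun p => if (p.1 == x) = true then v else p) = L := by
  induction L with
  | nil => rfl
  | cons a t ih => simp only [List.map_cons, if_neg (hL a (by simp)),
      ih (fun q hq => hL q (by simp [hq]))]

lemma fold_inv (pre : List (List Int)) (h : ∀ l ∈ pre, l ≠ []) :
    (pre.foldl stepA PySem.Dict.empty).keys.Nodup ∧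
    (pre.foldl stepB (PySem.Dict.empty, [])).1.items
        = enrichFrom 0 (pre.foldl stepA PySem.Dict.empty).items ∧
    ((pre.foldl stepB (PySem.Dict.empty, [])).2).Perm
        (decorFrom 0 (pre.foldl stepA PySem.Dict.empty).values) := by
  induction pre using List.reverseRecOn with
  | nil =>
    refine ⟨by simp [PySem.Dict.empty, PySem.Dict.keys], by simp [PySem.Dict.empty, enrichFrom], ?_⟩
    simp [PySem.Dict.empty, PySem.Dict.values, decorFrom]
  | append_singleton pre addr ih =>
    have h' : ∀ l ∈ pre, l ≠ [] := fun l hl => h l (List.mem_append_left _ hl)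
    obtain ⟨hnd, hfi, hperm⟩ := ih h'
    obtain ⟨x, t2, rfl⟩ := List.exists_cons_of_ne_nil (h _ (List.mem_append_right _ (List.mem_singleton_self _)))
    simp only [List.foldl_append, List.foldl_cons, List.foldl_nil]
    set d := pre.foldl stepA PySem.Dict.empty with hd
    set st := pre.foldl stepB (PySem.Dict.empty, ([] : List (Int × Int × List Int))) with hst
    have hkeys : st.1.keys = d.keys := by
      simp only [PySem.Dict.keys, hfi, map_fst_enrichFrom]
    unfold stepA stepB
    rw [pyGet?_zero_cons]
    simp only
    by_cases hc : d.contains x = true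
    · -- existing family
      have hxk : x ∈ d.keys := (PySem.Dict.contains_iff_mem_keys d x).mp hc
      obtain ⟨g, hpmem⟩ : ∃ g, (x, g) ∈ d.items := by simpa [PySem.Dict.keys] using hxk
      obtain ⟨I1, I2, hsplit⟩ := List.append_of_mem hpmem
      have hndk := hnd
      rw [PySem.Dict.keys, hsplit] at hndk
      simp only [List.map_append, List.map_cons] at hndk
      rw [List.nodup_append] at hndk
      obtain ⟨n1, n2, disj⟩ := hndk
      have hne1 : ∀ q ∈ I1, ¬(q.1 == x) = true := by
        intro q hq hbeq
        have hqx : q.1 = x := by simpa using hbeq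
        exact disj _ (List.mem_map_of_mem hq) x (List.mem_cons_self) hqx
      have hne2 : ∀ q ∈ I2, ¬(q.1 == x) = true := by
        intro q hq hbeq
        have hqx : q.1 = x := by simpa using hbeq
        rw [List.nodup_cons] at n2
        exact n2.1 (hqx ▸ List.mem_map_of_mem hq)
      -- A side
      rw [if_pos hc, PySem.Dict.modify,
        PySem.Dict.getD_of_mem_items d hpmem hnd []]
      have hAitems : (d.insert x (g ++ [x :: t2])).items
          = I1 ++ (x, g ++ [x :: t2]) :: I2 := by
        rw [PySem.Dict.items_insert_of_contains d _ hc, hsplit]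
        simp only [List.map_append, List.map_cons]
        rw [map_if_not_key I1 x _ hne1, map_if_not_key I2 x _ hne2]
        simp
      -- B side
      have hfiItems : st.1.items = enrichFrom 0 I1
          ++ (x, ((I1.length : Int), (g.length : Int))) :: enrichFrom ((I1.length : Int) + 1) I2 := by
        rw [hfi, hsplit, enrichFrom_append]
        simp [enrichFrom]
      have hBnd : st.1.keys.Nodup := by rw [hkeys]; exact hnd
      have hget : st.1.get? x = some ((I1.length : Int), (g.length : Int)) :=
        PySem.Dict.get?_of_mem_items _
          (by rw [hfiItems]; exact List.mem_append_right _ (List.mem_cons_self)) hBnd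
      rw [hget]
      simp only [Option.getD_some]
      have hcB : st.1.contains x = true := by
        rw [PySem.Dict.contains_iff_mem_keys, hkeys]; exact hxk
      have hmemfst : ∀ (r : Int) (itms : List (Int × List (List Int))) (q : Int × Int × Int),
          q ∈ enrichFrom r itms → q.1 ∈ itms.map (·.1) := by
        intro r itms q hq
        rw [← map_fst_enrichFrom itms r]
        exact List.mem_map_of_mem hq
      have hne1' : ∀ q ∈ enrichFrom 0 I1, ¬(q.1 == x) = true := by
        intro q hq hbeq
        have hqx : q.1 = x := by simpa using hbeq
        exact disj _ (hmemfst _ _ _ hq) x (List.mem_cons_self) hqx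
      have hne2' : ∀ q ∈ enrichFrom ((I1.length : Int) + 1) I2, ¬(q.1 == x) = true := by
        intro q hq hbeq
        have hqx : q.1 = x := by simpa using hbeq
        rw [List.nodup_cons] at n2
        exact n2.1 (hqx ▸ hmemfst _ _ _ hq)
      have hBitems : (st.1.insert x (((I1.length : Int), (g.length : Int)).1,
              ((I1.length : Int), (g.length : Int)).2 + 1)).items
          = enrichFrom 0 I1 ++ (x, ((I1.length : Int), (g.length : Int) + 1))
              :: enrichFrom ((I1.length : Int) + 1) I2 := by
        rw [PySem.Dict.items_insert_of_contains _ _ hcB, hfiItems]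
        simp only [List.map_append, List.map_cons]
        rw [map_if_not_key _ x _ hne1', map_if_not_key _ x _ hne2']
        simp
      refine ⟨?_, ?_, ?_⟩
      · have hk2 : (d.insert x (g ++ [x :: t2])).keys = d.keys := by
          rw [PySem.Dict.keys, hAitems, PySem.Dict.keys, hsplit]
          simp
        rw [hk2]; exact hnd
      · rw [hBitems, hAitems, enrichFrom_append]
        simp [enrichFrom]
      · have hAvals : (d.insert x (g ++ [x :: t2])).values
            = I1.map (·.2) ++ (g ++ [x :: t2]) :: I2.map (·.2) := by
          rw [PySem.Dict.values, hAitems]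
          simp
        have hdvals : d.values = I1.map (·.2) ++ g :: I2.map (·.2) := by
          rw [PySem.Dict.values, hsplit]
          simp
        have hlen1 : (I1.map (·.2 : Int × List (List Int) → List (List Int))).length = I1.length := by
          simp
        rw [hAvals, decorFrom_append]
        rw [show ((g ++ [x :: t2]) :: I2.map (·.2)) = [g ++ [x :: t2]] ++ I2.map (·.2) from rfl]
        rw [decorFrom_append]
        rw [hdvals] at hperm
        rw [decorFrom_append, show (g :: I2.map (·.2)) = [g] ++ I2.map (·.2) from rfl,
          decorFrom_append] at hperm
        simp only [decorFrom, List.append_nil, hlen1, List.length_singleton, zero_add] at hperm ⊢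
        rw [PySem.List.enumerate_append]
        simp only [List.map_append, zero_add]
        have hsing : (PySem.List.enumerate [x :: t2] ((g.length : Int))).map
            (fun ix => (ix.1, (I1.length : Int), ix.2))
            = [((g.length : Int), (I1.length : Int), x :: t2)] := by
          simp [PySem.List.enumerate_cons, PySem.List.enumerate_nil]
        rw [hsing]
        refine ((hperm.append_right [((g.length : Int), (I1.length : Int), x :: t2)]).trans ?_)
        simp only [List.append_assoc]
        exact List.Perm.append_left _ (List.Perm.append_left _
          (List.perm_append_singleton ((g.length : Int), (I1.length : Int), x :: t2) _))
    · -- new family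
      have hcB : st.1.contains x ≠ true := by
        intro hx
        rw [PySem.Dict.contains_iff_mem_keys, hkeys, ← PySem.Dict.contains_iff_mem_keys] at hx
        exact hc hx
      have hget : st.1.get? x = none := by
        rw [PySem.Dict.get?_eq_none_iff_not_mem_keys, hkeys, ← PySem.Dict.contains_iff_mem_keys]
        simp [hc]
      have hsize : st.1.size = d.items.length := by
        simp [PySem.Dict.size, hfi, length_enrichFrom]
      have hxk : x ∉ d.keys := by rw [← PySem.Dict.contains_iff_mem_keys]; simp [hc]
      -- A side
      rw [if_neg hc, PySem.Dict.modify, PySem.Dict.getD_insert_self, PySem.Dict.insert_insert_self]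
      simp only [List.nil_append]
      have hAitems : (d.insert x [x :: t2]).items = d.items ++ [(x, [x :: t2])] := by
        apply PySem.Dict.items_insert_of_not_contains
        simp [hc]
      -- B side
      rw [hget]
      simp only [Option.getD_none]
      have hBitems : (st.1.insert x (((st.1.size : Int), 0).1, ((st.1.size : Int), 0).2 + 1)).items
          = st.1.items ++ [(x, ((st.1.size : Int), 1))] := by
        apply PySem.Dict.items_insert_of_not_contains
        simpa using hcB
      refine ⟨?_, ?_, ?_⟩
      · have hAkeys : (d.insert x [x :: t2]).keys = d.keys ++ [x] := by
          rw [PySem.Dict.keys, hAitems]; simp [PySem.Dict.keys]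
        rw [hAkeys, List.nodup_append]
        exact ⟨hnd, List.nodup_singleton _, by simp; exact fun a ha hax => hxk (hax ▸ ha)⟩
      · rw [hBitems, hAitems, enrichFrom_append, hfi, hsize]
        simp [enrichFrom]
      · have hAvals : (d.insert x [x :: t2]).values = d.values ++ [[x :: t2]] := by
          simp [PySem.Dict.values, hAitems]
        rw [hAvals, decorFrom_append]
        have hlen : d.values.length = d.items.length := by simp [PySem.Dict.values]
        have hsing : decorFrom (0 + (d.values.length : Int)) [[x :: t2]]
            = [(0, (d.items.length : Int), x :: t2)] := by
          simp [decorFrom, PySem.List.enumerate_cons, PySem.List.enumerate_nil, hlen]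
        rw [hsing, hsize]
        exact hperm.append_right _


lemma map_thd_colRow (ls : List (List (List Int))) (k : Nat) (r : Int) :
    (colRow k r ls).map (fun t => t.2.2) = ls.filterMap (fun l => l[k]?) := by
  induction ls generalizing r with
  | nil => rfl
  | cons g t ih =>
    cases hg : g[k]? <;> simp [colRow, hg, ih]

lemma nodup_decorFrom (ls : List (List (List Int))) (r : Int) : (decorFrom r ls).Nodup :=
  (pairwise_rank_decorFrom ls r).imp (by rintro a b (h | ⟨-, h⟩) rfl <;> exact lt_irrefl _ h)

lemma nodup_colDecor (ls : List (List (List Int))) (m : Nat) : (colDecor m ls).Nodup :=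
  (pairwise_key_colDecor ls m).imp (by rintro a b h rfl; exact lt_irrefl _ h)

lemma decor_perm_colDecor (ls : List (List (List Int))) (m : Nat)
    (hm : ∀ g ∈ ls, g.length ≤ m) : (decorFrom 0 ls).Perm (colDecor m ls) := by
  refine (List.perm_ext_iff_of_nodup (nodup_decorFrom ls 0) (nodup_colDecor ls m)).mpr ?_
  intro e
  rw [mem_decorFrom]
  constructor
  · rintro ⟨i, hi, k, hk, rfl⟩
    refine List.mem_flatMap.mpr ⟨k, List.mem_range.mpr ?_, (mem_colRow ls k 0 _).mpr ⟨i, hi, hk, rfl⟩⟩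
    exact lt_of_lt_of_le hk (hm _ (ls.getElem_mem hi))
  · rintro he
    obtain ⟨k, -, hrow⟩ := List.mem_flatMap.mp he
    obtain ⟨i, hi, hk, rfl⟩ := (mem_colRow ls k 0 _).mp hrow
    exact ⟨i, hi, k, hk, rfl⟩

lemma map_thd_colDecor (ls : List (List (List Int))) (m : Nat) :
    (colDecor m ls).map (fun t => t.2.2)
      = (List.range m).flatMap (fun k => ls.filterMap (fun l => l[k]?)) := by
  unfold colDecor
  rw [List.map_flatMap]
  exact List.flatMap_congr (fun k _ => map_thd_colRow ls k 0)

theorem interleave_addrinfos_py_spec : Claim_equal_interleave_addrinfos_py := by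
  intro addrinfos _ hpre
  unfold Spec_interleave_addrinfos_py
  obtain ⟨hnd, hfi, hperm⟩ := fold_inv addrinfos hpre
  have hA : interleave_addrinfos_py addrinfos
      = ((pyZipLongest ((addrinfos.foldl stepA PySem.Dict.empty).values)).flatten).filterMap id := rfl
  have hB : interleave_addrinfos_py_alt addrinfos
      = (PySem.List.sorted (addrinfos.foldl stepB (PySem.Dict.empty, [])).2
          (fun t => t.1 * (((addrinfos.foldl stepB (PySem.Dict.empty, [])).1.size : Nat) : Int) + t.2.1)).map
          (fun t => t.2.2) := rfl
  set d := addrinfos.foldl stepA PySem.Dict.empty with hd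
  set st := addrinfos.foldl stepB (PySem.Dict.empty, ([] : List (Int × Int × List Int))) with hst
  set ls := d.values with hls
  set m := ls.foldl (fun acc l => max acc l.length) 0 with hm
  have hmb : ∀ g ∈ ls, g.length ≤ m := (PySem.List.le_foldl_max_nat ls (fun l => l.length) 0).2
  have hsize : st.1.size = ls.length := by
    simp [PySem.Dict.size, hfi, length_enrichFrom, hls, PySem.Dict.values]
  have hsorted : PySem.List.sorted st.2 (fun t => t.1 * (ls.length : Int) + t.2.1)
      = colDecor m ls :=
    PySem.List.sorted_eq_of_perm_of_pairwise_lt _ _ _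
      (((decor_perm_colDecor ls m hmb).symm).trans hperm.symm)
      (pairwise_key_colDecor ls m)
  rw [hA, hB, hsize, hsorted, map_thd_colDecor]
  unfold pyZipLongest
  rw [← hm]
  simp [List.filterMap_flatten, List.map_map, List.filterMap_map, List.flatMap_def,
    Function.comp_def]
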